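-- pv_equiv track=rewrite | github.com/Goyatuzo/python-problems | code_forces/1392/b/omkar_and_infinity_clock.py | omkar_and_infinity_clock
-- ===== SOURCE A (Python) =====
-- from typing import List
--
-- def omkar_and_infinity_clock(k: int, nums: List[int]) -> str:
--     # Find the max
--     maximum = nums[0]
--
--     for i in nums:
--         maximum = i if i > maximum else maximum
--
--     # Now keep applying it while k > 0
--     while k > 0:
--         nums = [maximum - ai for ai in nums]
--
--         # Subtract 1 here since it's one operation
--         k -= 1
--
--         # Find max again
--         maximum = nums[0]
--
--         for i in nums:
--             maximum = i if i > maximum else maximum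
--
--
--     return ' '.join(map(str, nums))
-- ===== SOURCE B (Python) =====
-- def omkar_and_infinity_clock(k, nums):
--     # The operation a_i -> max(a) - a_i has period 2, so only k's parity matters.
--     if k > 0:
--         if k % 2 == 1:
--             M = max(nums)
--             nums = [M - a for a in nums]
--         else:
--             m = min(nums)
--             nums = [a - m for a in nums]
--     return ' '.join(map(str, nums))
-- ===== Notes on version B (the rewrite author's own statement) =====
-- stated objective: faster
-- what changed: B replaces A's k-iteration simulation with the closed form from the operation's period-2: one subtraction pass using only k's parity (max-a_i if k odd, a_i-min if positive even).
import Mathlib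
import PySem

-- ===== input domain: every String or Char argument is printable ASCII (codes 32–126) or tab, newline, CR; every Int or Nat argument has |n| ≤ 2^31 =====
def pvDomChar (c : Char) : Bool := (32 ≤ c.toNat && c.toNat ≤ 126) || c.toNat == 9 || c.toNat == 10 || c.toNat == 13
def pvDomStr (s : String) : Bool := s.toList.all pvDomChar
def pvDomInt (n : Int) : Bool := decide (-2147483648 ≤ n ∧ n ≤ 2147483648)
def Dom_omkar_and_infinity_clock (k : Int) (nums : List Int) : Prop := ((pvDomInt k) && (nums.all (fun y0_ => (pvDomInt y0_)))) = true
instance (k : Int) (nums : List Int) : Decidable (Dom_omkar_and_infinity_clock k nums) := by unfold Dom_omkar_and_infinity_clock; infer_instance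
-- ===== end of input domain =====

-- B computes A's result in one pass from k's parity (the operation has period 2); proved equal on nonempty lists (A raises IndexError on []).

-- ===== PORT A =====
-- A's running-max loop: maximum = acc; for i in l: maximum = i if i > maximum else maximum
def pvFoldMaxA (acc : Int) (l : List Int) : Int :=
  l.foldl (fun m i => if i > m then i else m) acc

-- the while-loop body: nums = [maximum - ai for ai in nums] (maximum = current max, recomputed from nums[0])
def pvStepA (l : List Int) : List Int :=
  l.map (fun ai => pvFoldMaxA l.headI l - ai)

-- 'while k > 0': structural recursion on the (integer) counter
def pvLoopA (k : Int) (l : List Int) : List Int :=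
  if k > 0 then pvLoopA (k - 1) (pvStepA l) else l
  termination_by k.toNat
  decreasing_by omega

def omkar_and_infinity_clock (k : Int) (nums : List Int) : String :=
  match nums with
  | [] => ""   -- nums[0] raises IndexError in Python; excluded by Pre_
  | _ :: _ => PySem.Str.join " " ((pvLoopA k nums).map PySem.Int.toStr)

-- ===== PORT B =====
def omkar_and_infinity_clock_alt (k : Int) (nums : List Int) : String :=
  let nums' :=
    if k > 0 then
      if PySem.Int.mod k 2 = 1 then
        match PySem.List.max? nums (fun x => x) with
        | some M => nums.map (fun a => M - a)
        | none => []   -- max([]) raises ValueError; excluded by Pre_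
      else
        match PySem.List.min? nums (fun x => x) with
        | some m => nums.map (fun a => a - m)
        | none => []
    else nums
  PySem.Str.join " " (nums'.map PySem.Int.toStr)

-- ===== PRECONDITION & SPEC =====
-- A raises IndexError on the empty list (nums[0]); Pre_ excludes exactly that.
def Pre_omkar_and_infinity_clock (k : Int) (nums : List Int) : Prop := nums ≠ []
instance (k : Int) (nums : List Int) : Decidable (Pre_omkar_and_infinity_clock k nums) := by unfold Pre_omkar_and_infinity_clock; infer_instance
def pvWitness_omkar_and_infinity_clock : Int × List Int := (3, [1, 5, 2])
def Spec_omkar_and_infinity_clock (k : Int) (nums : List Int) (out : String) : Prop := out = omkar_and_infinity_clock_alt k nums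
instance (k : Int) (nums : List Int) (out : String) : Decidable (Spec_omkar_and_infinity_clock k nums out) := by unfold Spec_omkar_and_infinity_clock; infer_instance

-- ===== CLAIM =====
def Claim_equal_omkar_and_infinity_clock : Prop := ∀ (k : Int) (nums : List Int), Dom_omkar_and_infinity_clock k nums → Pre_omkar_and_infinity_clock k nums → Spec_omkar_and_infinity_clock k nums (omkar_and_infinity_clock k nums)

-- ===== LEMMAS AND PROOFS =====

-- A's conditional fold is the max fold
theorem pvFoldMaxA_eq_foldl_max (acc : Int) (l : List Int) :
    pvFoldMaxA acc l = l.foldl max acc := by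
  unfold pvFoldMaxA
  induction l generalizing acc with
  | nil => rfl
  | cons h t ih =>
    simp only [List.foldl_cons, ih]
    congr 1
    by_cases hc : h > acc <;> simp [hc] <;> omega

def pvFMin (acc : Int) (l : List Int) : Int := l.foldl min acc

-- max of the reflected list c - a
theorem foldl_max_reflect (c acc : Int) (l : List Int) :
    (l.map (fun a => c - a)).foldl max (c - acc) = c - pvFMin acc l := by
  unfold pvFMin
  induction l generalizing acc with
  | nil => rfl
  | cons h t ih =>
    simp only [List.map_cons, List.foldl_cons]
    have e : max (c - acc) (c - h) = c - min acc h := by omega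
    rw [e, ih]

-- max of the shifted list a - m
theorem foldl_max_shift (m acc : Int) (l : List Int) :
    (l.map (fun a => a - m)).foldl max (acc - m) = l.foldl max acc - m := by
  induction l generalizing acc with
  | nil => rfl
  | cons h t ih =>
    simp only [List.map_cons, List.foldl_cons]
    have e : max (acc - m) (h - m) = max acc h - m := by omega
    rw [e, ih]

theorem pvStepA_cons (h : Int) (t : List Int) :
    pvStepA (h :: t) = (h :: t).map (fun a => t.foldl max h - a) := by
  unfold pvStepA
  simp [pvFoldMaxA_eq_foldl_max, max_self]

-- two steps on a nonempty list: subtract the min from each element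
theorem pvStepA_step (h : Int) (t : List Int) :
    pvStepA (pvStepA (h :: t)) = (h :: t).map (fun a => a - pvFMin h t) := by
  rw [pvStepA_cons h t]
  simp only [List.map_cons]
  rw [pvStepA_cons]
  rw [show ((t.map (fun a => t.foldl max h - a)).foldl max (t.foldl max h - h))
      = t.foldl max h - pvFMin h t from by
    simpa using foldl_max_reflect (t.foldl max h) h t]
  simp only [List.map_cons, List.map_map]
  congr 1
  · omega
  · refine List.map_congr_left ?_
    intro a _
    simp only [Function.comp_apply]
    omega

-- period 2: three steps equal one step
theorem pvStepA_period (h : Int) (t : List Int) :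
    pvStepA (pvStepA (pvStepA (h :: t))) = pvStepA (h :: t) := by
  rw [pvStepA_step]
  simp only [List.map_cons]
  rw [pvStepA_cons, pvStepA_cons h t]
  rw [show ((t.map (fun a => a - pvFMin h t)).foldl max (h - pvFMin h t))
      = t.foldl max h - pvFMin h t from by
    simpa using foldl_max_shift (pvFMin h t) h t]
  simp only [List.map_cons, List.map_map]
  congr 1
  · omega
  · refine List.map_congr_left ?_
    intro a _
    simp only [Function.comp_apply]
    omega

theorem pvLoopA_unfold (k : Int) (l : List Int) :
    pvLoopA k l = if k > 0 then pvLoopA (k - 1) (pvStepA l) else l := by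
  rw [pvLoopA]

-- closed form of the loop for k ≥ 1 on a nonempty list
theorem pvLoopA_closed (k : Int) (hk : 0 < k) (h : Int) (t : List Int) :
    pvLoopA k (h :: t) =
      if k % 2 = 1 then pvStepA (h :: t) else pvStepA (pvStepA (h :: t)) := by
  generalize hn : k.toNat = n
  induction n using Nat.strong_induction_on generalizing k h t with
  | _ n ih =>
    rw [pvLoopA_unfold, if_pos hk]
    by_cases h1 : k = 1
    · subst h1
      rw [pvLoopA_unfold]
      norm_num
    by_cases h2 : k = 2
    · subst h2
      rw [pvLoopA_unfold, if_pos (by norm_num), pvLoopA_unfold]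
      norm_num
    · have hk3 : 3 ≤ k := by omega
      obtain ⟨h', t', hst⟩ : ∃ h' t', pvStepA (h :: t) = h' :: t' := by
        cases e : pvStepA (h :: t) with
        | nil => exact absurd e (by simp [pvStepA])
        | cons a b => exact ⟨a, b, rfl⟩
      rw [hst]
      rw [ih (k - 1).toNat (by omega) (k - 1) (by omega) h' t' rfl]
      rw [← hst]
      by_cases hp : k % 2 = 1
      · rw [if_pos hp, if_neg (by omega), pvStepA_period]
      · rw [if_neg hp, if_pos (by omega)]

-- ===== VERDICT =====
theorem omkar_and_infinity_clock_spec : Claim_equal_omkar_and_infinity_clock := by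
  intro k nums _ hpre
  unfold Spec_omkar_and_infinity_clock
  obtain ⟨h, t, rfl⟩ : ∃ h t, nums = h :: t := by
    cases nums with
    | nil => exact absurd rfl hpre
    | cons a b => exact ⟨a, b, rfl⟩
  unfold omkar_and_infinity_clock omkar_and_infinity_clock_alt
  simp only
  congr 1
  congr 1
  by_cases hk : k > 0
  · rw [if_pos hk]
    have hmod : PySem.Int.mod k 2 = k % 2 := by
      simp [PySem.Int.mod, Int.fmod_eq_emod_of_nonneg]
    rw [pvLoopA_closed k hk h t, hmod]
    by_cases hp : k % 2 = 1
    · rw [if_pos hp, if_pos hp, PySem.List.max?_id_cons]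
      simp only
      rw [pvStepA_cons]
    · rw [if_neg hp, if_neg hp, PySem.List.min?_id_cons]
      simp only
      rw [pvStepA_step]
      rfl
  · rw [if_neg hk, pvLoopA_unfold, if_neg hk]
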